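-- pv_equiv track=rewrite | github.com/stdiorion/competitive-programming | contests_atcoder/abc154/abc154_e_check.py | stupid
-- ===== SOURCE A (Python) =====
-- def stupid(n, k):
--     n = int(n)
--     count = 0
--
--     for i in range(1, n + 1):
--         I = str(i)
--         if len(I) - I.count("0") == k:
--             count += 1
--     return count
-- ===== SOURCE B (Python) =====
-- def stupid(n, k):
--     n = int(n)
--
--     def nzd(m):
--         c = 0
--         while m > 0:
--             if m % 10:
--                 c += 1
--             m //= 10
--         return c
--
--     def g(m, kk):
--         # number of x in 0..m with exactly kk nonzero decimal digits
--         if m < 0 or kk < 0: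
--             return 0
--         q, r = divmod(m, 10)
--         nzq = nzd(q)
--         return (g(q - 1, kk) + 9 * g(q - 1, kk - 1)
--                 + (1 if nzq == kk else 0)
--                 + r * (1 if nzq == kk - 1 else 0))
--
--     if n < 0:
--         return 0
--     return g(n, k) - (1 if k == 0 else 0)
-- ===== Notes on version B (the rewrite author's own statement) =====
-- stated objective: faster
-- what changed: A tests every number 1..n via its decimal string; B counts the numbers with exactly k nonzero digits by a divide-by-10 digit recursion (g(m,k) splits 0..m by the last digit), never enumerating the range.
import Mathlib
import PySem

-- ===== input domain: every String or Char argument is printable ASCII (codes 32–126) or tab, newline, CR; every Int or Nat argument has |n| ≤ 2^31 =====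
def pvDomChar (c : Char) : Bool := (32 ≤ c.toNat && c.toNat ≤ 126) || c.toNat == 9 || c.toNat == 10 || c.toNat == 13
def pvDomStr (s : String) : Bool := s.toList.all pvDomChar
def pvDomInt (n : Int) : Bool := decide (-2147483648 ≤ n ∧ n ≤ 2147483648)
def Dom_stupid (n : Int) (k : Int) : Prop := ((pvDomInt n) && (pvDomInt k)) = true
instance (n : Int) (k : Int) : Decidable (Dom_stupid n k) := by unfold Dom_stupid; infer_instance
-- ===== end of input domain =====

-- B replaces A's per-number string scan of 1..n by a digit-by-digit counting recursion (divide by 10); faster asymptotically.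

-- ===== PORT A =====
def stupid (n : Int) (k : Int) : Int :=
  -- n = int(n) is the identity on an int argument
  (PySem.List.pyRange 1 (n + 1) 1).foldl
    (fun count i =>
      let I := PySem.Int.toStr i
      if PySem.Str.len I - (PySem.Str.count I "0" : Int) = k then count + 1 else count)
    0

-- ===== PORT B =====
-- helper nzd: c = 0; while m > 0: if m % 10: c += 1; m //= 10; return c
def pvNzdGo (m : Int) (c : Int) : Int :=
  if h : 0 < m then
    pvNzdGo (PySem.Int.floordiv m 10) (if PySem.Int.mod m 10 ≠ 0 then c + 1 else c)
  else c
termination_by m.toNat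
decreasing_by
  simp only [PySem.Int.floordiv]
  rw [Int.fdiv_eq_ediv]
  simp only [show ((0:Int) ≤ 10 ∨ (10:Int) ∣ m) = True by simp, if_true]
  omega

def pvNzd (m : Int) : Int := pvNzdGo m 0

-- helper g: number of x in 0..m with exactly kk nonzero decimal digits
def pvG (m : Int) (kk : Int) : Int :=
  if h : m < 0 ∨ kk < 0 then 0
  else
    let q := PySem.Int.floordiv m 10
    let r := PySem.Int.mod m 10
    let nzq := pvNzd q
    pvG (q - 1) kk + 9 * pvG (q - 1) (kk - 1)
      + (if nzq = kk then 1 else 0) + r * (if nzq = kk - 1 then 1 else 0)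
termination_by (m + 1).toNat
decreasing_by
  all_goals
    simp only [PySem.Int.floordiv]
    rw [Int.fdiv_eq_ediv]
    simp only [show ((0:Int) ≤ 10 ∨ (10:Int) ∣ m) = True by simp, if_true]
    omega

def stupid_alt (n : Int) (k : Int) : Int :=
  if n < 0 then 0 else pvG n k - (if k = 0 then 1 else 0)

-- ===== PRECONDITION & SPEC =====
def Spec_stupid (n : Int) (k : Int) (out : Int) : Prop := out = stupid_alt n k
instance (n : Int) (k : Int) (out : Int) : Decidable (Spec_stupid n k out) := by unfold Spec_stupid; infer_instance

-- ===== CLAIM (what is proved, stated in full; the proofs are below) =====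
def Claim_equal_stupid : Prop := ∀ (n : Int) (k : Int), Dom_stupid n k → Spec_stupid n k (stupid n k)

-- ===== LEMMAS AND PROOFS =====

lemma fdiv10 (a : Int) : PySem.Int.floordiv a 10 = a / 10 := by
  simp [PySem.Int.floordiv, Int.fdiv_eq_ediv]

lemma fmod10 (a : Int) : PySem.Int.mod a 10 = a % 10 := by
  simp [PySem.Int.mod, Int.fmod_eq_emod]

-- number of nonzero decimal digits of a natural number
def nzdN (m : Nat) : Nat :=
  if h : m = 0 then 0 else (if m % 10 ≠ 0 then 1 else 0) + nzdN (m / 10)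
termination_by m
decreasing_by exact Nat.div_lt_self (Nat.pos_of_ne_zero h) (by norm_num)

-- decimal representation (most significant digit first), as Nat.toDigits produces it
def pvRep (m : Nat) : List Char :=
  if m < 10 then [Nat.digitChar m] else pvRep (m / 10) ++ [Nat.digitChar (m % 10)]
termination_by m
decreasing_by exact Nat.div_lt_self (by omega) (by norm_num)

lemma toDigitsCore_eq_pvRep : ∀ (fuel n : Nat) (ds : List Char), n < 10 ^ fuel → 0 < fuel →
    Nat.toDigitsCore 10 fuel n ds = pvRep n ++ ds := by
  intro fuel
  induction fuel with
  | zero => omega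
  | succ f ih =>
    intro n ds hn _
    rw [Nat.toDigitsCore]
    by_cases h10 : n < 10
    · have hq : n / 10 = 0 := Nat.div_eq_of_lt h10
      simp only [hq, reduceIte]
      rw [pvRep, if_pos h10]
      have : n % 10 = n := Nat.mod_eq_of_lt h10
      rw [this]
      rfl
    · have hq : n / 10 ≠ 0 := by intro h; exact h10 (by omega)
      simp only [if_neg hq]
      have hf : 0 < f := by
        by_contra hf
        have : f = 0 := by omega
        subst this
        simp at hn; omega
      rw [ih (n / 10) _ (by
        rw [Nat.div_lt_iff_lt_mul (by norm_num)]
        calc n < 10 ^ (f + 1) := hn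
        _ = 10 ^ f * 10 := by ring) hf]
      conv_rhs => rw [pvRep]
      rw [if_neg h10]
      simp

lemma toDigits_eq_pvRep (n : Nat) : Nat.toDigits 10 n = pvRep n := by
  rw [Nat.toDigits]
  exact toDigitsCore_eq_pvRep (n + 1) n [] (by
    calc n < 10 ^ n := Nat.lt_pow_self (by norm_num)
    _ ≤ 10 ^ (n + 1) := Nat.pow_le_pow_right (by norm_num) (by omega)) (by omega) |>.trans (by simp)

lemma count_go_single (c : Char) : ∀ (fuel : Nat) (l : List Char) (acc : Nat), l.length ≤ fuel →
    PySem.Chars.count.go [c] fuel l acc = acc + l.count c := by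
  intro fuel
  induction fuel with
  | zero =>
    intro l acc h
    have : l = [] := by cases l <;> simp_all
    subst this
    simp [PySem.Chars.count.go]
  | succ f ih =>
    intro l acc h
    cases l with
    | nil => simp [PySem.Chars.count.go]
    | cons hd t =>
      rw [PySem.Chars.count.go]
      by_cases hc : c = hd
      · subst hc
        have hp : List.isPrefixOf [c] (c :: t) = true := by simp [List.isPrefixOf]
        simp only [hp, if_pos]
        rw [ih _ _ (by simp at h ⊢; omega)]
        simp
        omega
      · have hp : List.isPrefixOf [c] (hd :: t) = false := by
          simp [List.isPrefixOf]; exact hc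
        simp only [hp, Bool.false_eq_true, if_false]
        rw [ih _ _ (by simp at h ⊢; omega)]
        simp [Ne.symm hc]

lemma chars_count_single (cs : List Char) (c : Char) :
    PySem.Chars.count cs [c] = cs.count c := by
  rw [PySem.Chars.count]
  simp only [List.isEmpty_cons, Bool.false_eq_true, if_false]
  rw [count_go_single c cs.length cs 0 (le_refl _)]
  omega

lemma digitChar_eq_zero_iff (d : Nat) (h : d < 10) : Nat.digitChar d = '0' ↔ d = 0 := by
  interval_cases d <;> simp [Nat.digitChar]

lemma countP_pvRep : ∀ (n : Nat),
    (pvRep n).countP (fun a => decide ¬(a == '0') = true) = nzdN n := by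
  intro n
  induction n using Nat.strong_induction_on with
  | _ n ih =>
    rw [pvRep]
    by_cases h10 : n < 10
    · rw [if_pos h10]
      by_cases h0 : n = 0
      · subst h0; simp [nzdN, Nat.digitChar]
      · rw [nzdN, dif_neg h0]
        have hmod : n % 10 = n := Nat.mod_eq_of_lt h10
        rw [nzdN]
        simp [hmod, h0, Nat.div_eq_of_lt h10,
          (digitChar_eq_zero_iff n h10)]
    · rw [if_neg h10]
      rw [List.countP_append, ih (n / 10) (Nat.div_lt_self (by omega) (by norm_num))]
      conv_rhs => rw [nzdN]
      rw [dif_neg (by omega : ¬ n = 0)]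
      have := digitChar_eq_zero_iff (n % 10) (Nat.mod_lt _ (by norm_num))
      by_cases hz : n % 10 = 0
      · have hd : Nat.digitChar (n % 10) = '0' := by rw [hz]; decide
        simp only [List.countP_cons, List.countP_nil, hz]
        rw [if_neg (by decide), if_neg (by decide)]
        omega
      · have hd : ¬ (Nat.digitChar (n % 10) = '0') := fun hh => hz (this.mp hh)
        simp only [List.countP_cons, List.countP_nil]
        rw [if_pos (by simp [hd]), if_pos (by simp [hz])]
        omega

-- A's per-number test equals "number of nonzero digits = k"
lemma cond_eq (i k : Int) (hi : 1 ≤ i) :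
    ((PySem.Str.len (PySem.Int.toStr i) - (PySem.Str.count (PySem.Int.toStr i) "0" : Int) = k)
      ↔ ((nzdN i.toNat : Int) = k)) := by
  have htl : (PySem.Int.toStr i).toList = Nat.toDigits 10 i.toNat := by
    rw [PySem.Int.toList_toStr, PySem.Int.toChars, if_neg (by omega)]
  have hz : ("0" : String).toList = ['0'] := rfl
  rw [PySem.Str.len_eq, PySem.Str.count_eq, htl, hz, chars_count_single, toDigits_eq_pvRep]
  have hsplit := List.length_eq_countP_add_countP (fun a => a == '0') (l := pvRep i.toNat)
  have hcnt : (pvRep i.toNat).count '0'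
      = (pvRep i.toNat).countP (fun a => a == '0') := by
    simp [List.count]
  have hP := countP_pvRep i.toNat
  rw [hcnt]
  omega

lemma pvNzdGo_eq : ∀ (m c : Int), pvNzdGo m c = c + (nzdN m.toNat : Int) := by
  intro m
  induction hm : m.toNat using Nat.strong_induction_on generalizing m with
  | _ N ih =>
    intro c
    rw [← hm, pvNzdGo]
    by_cases h : 0 < m
    · rw [dif_pos h, fdiv10, fmod10]
      rw [ih (m / 10).toNat (by omega) _ (by rfl)]
      conv_rhs => rw [nzdN]
      rw [dif_neg (by omega : ¬ m.toNat = 0)]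
      have h1 : (m / 10).toNat = m.toNat / 10 := by omega
      have h2 : m % 10 = ((m.toNat % 10 : Nat) : Int) := by omega
      rw [h1, h2]
      split_ifs with ha hb <;> push_cast <;> omega
    · rw [dif_neg h]
      have : m.toNat = 0 := by omega
      rw [this, nzdN]
      simp

lemma pvNzd_eq (m : Int) : pvNzd m = (nzdN m.toNat : Int) := by
  rw [pvNzd, pvNzdGo_eq]; omega

lemma pvG_neg (k : Int) : pvG (-1) k = 0 := by
  rw [pvG, dif_pos (Or.inl (by omega))]

lemma pvG_step : ∀ (m k : Int), 0 ≤ m →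
    pvG m k = pvG (m - 1) k + (if (nzdN m.toNat : Int) = k then 1 else 0) := by
  intro m
  induction hm : m.toNat using Nat.strong_induction_on generalizing m with
  | _ N ih =>
    intro k h0
    rw [← hm]
    by_cases hk : k < 0
    · rw [pvG, dif_pos (Or.inr hk), pvG, dif_pos (Or.inr hk), if_neg (by omega)]
      omega
    · rw [pvG, dif_neg (by omega)]
      simp only [fdiv10, fmod10, pvNzd_eq]
      by_cases hm0 : m = 0
      · subst hm0
        rw [show ((0:Int) / 10 - 1) = -1 by omega, pvG_neg, pvG_neg]
        rw [show ((0:Int) - 1) = -1 by omega, pvG_neg]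
        norm_num
      · by_cases hr : m % 10 = 0
        · -- last digit 0: m = 10*q with q ≥ 1; m-1 = 10*(q-1)+9
          have hq1 : 1 ≤ m / 10 := by omega
          conv_rhs => rw [pvG]
          rw [dif_neg (by omega)]
          simp only [fdiv10, fmod10, pvNzd_eq]
          have e1 : (m - 1) / 10 = m / 10 - 1 := by omega
          have e2 : (m - 1) % 10 = 9 := by omega
          rw [e1, e2]
          have ih1 := ih (m / 10 - 1).toNat (by omega) (m / 10 - 1) rfl k (by omega)
          have ih2 := ih (m / 10 - 1).toNat (by omega) (m / 10 - 1) rfl (k - 1) (by omega)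
          rw [show (m / 10 - 1 - 1 : Int) = m / 10 - 2 by omega] at ih1 ih2
          rw [show (m / 10 - 1 - 1 : Int) = m / 10 - 2 by omega]
          have hnz : nzdN m.toNat = nzdN (m / 10).toNat := by
            conv_lhs => rw [nzdN]
            rw [dif_neg (by omega : ¬ m.toNat = 0)]
            rw [if_neg (by omega : ¬ m.toNat % 10 ≠ 0)]
            rw [show m.toNat / 10 = (m / 10).toNat by omega]
            omega
          rw [hnz, ih1, ih2]
          split_ifs <;> omega
        · -- last digit r ≥ 1: m-1 = 10*q + (r-1)
          conv_rhs => rw [pvG]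
          rw [dif_neg (by omega)]
          simp only [fdiv10, fmod10, pvNzd_eq]
          have e1 : (m - 1) / 10 = m / 10 := by omega
          have e2 : (m - 1) % 10 = m % 10 - 1 := by omega
          rw [e1, e2]
          have hnz : nzdN m.toNat = nzdN (m / 10).toNat + 1 := by
            conv_lhs => rw [nzdN]
            rw [dif_neg (by omega : ¬ m.toNat = 0)]
            rw [if_pos (by omega : m.toNat % 10 ≠ 0)]
            rw [show m.toNat / 10 = (m / 10).toNat by omega]
            omega
          rw [hnz]
          split_ifs <;> omega

lemma stupid_succ (n : Nat) (k : Int) :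
    stupid ((n + 1 : Nat) : Int) k
      = stupid (n : Int) k + (if ((nzdN (n + 1) : Nat) : Int) = k then 1 else 0) := by
  unfold stupid
  rw [show (((n + 1 : Nat) : Int) + 1) = ((n : Int) + 1) + 1 by push_cast; ring]
  rw [PySem.List.pyRange_one_succ_right (by omega), List.foldl_append]
  simp only [List.foldl_cons, List.foldl_nil]
  have hc := cond_eq ((n : Int) + 1) k (by omega)
  have ht : ((n : Int) + 1).toNat = n + 1 := by omega
  rw [ht] at hc
  simp only [hc]
  split_ifs <;> omega

lemma alt_succ (n : Nat) (k : Int) :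
    stupid_alt ((n + 1 : Nat) : Int) k
      = stupid_alt (n : Int) k + (if ((nzdN (n + 1) : Nat) : Int) = k then 1 else 0) := by
  unfold stupid_alt
  rw [if_neg (show ¬ (((n + 1 : Nat) : Int) < 0) by push_cast; omega),
    if_neg (show ¬ ((n : Int) < 0) by omega)]
  have hstep := pvG_step ((n : Int) + 1) k (by omega)
  rw [show ((n : Int) + 1 - 1) = (n : Int) by ring] at hstep
  rw [show (((n + 1 : Nat) : Int)) = ((n : Int) + 1) by push_cast; ring]
  rw [hstep, show ((n : Int) + 1).toNat = n + 1 by omega]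
  split_ifs <;> omega

lemma stupid_eq_alt_nat : ∀ (N : Nat) (k : Int), stupid (N : Int) k = stupid_alt (N : Int) k := by
  intro N
  induction N with
  | zero =>
    intro k
    unfold stupid stupid_alt
    simp only [Nat.cast_zero]
    rw [PySem.List.pyRange_one_eq_nil (by omega), if_neg (by omega)]
    simp only [List.foldl_nil]
    by_cases hk : k < 0
    · rw [pvG, dif_pos (Or.inr hk), if_neg (by omega)]
      omega
    · rw [pvG, dif_neg (by omega)]
      simp only [fdiv10, fmod10, pvNzd_eq]
      rw [show ((0:Int) / 10 - 1) = -1 by omega, pvG_neg, pvG_neg]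
      rw [show ((0:Int) / 10).toNat = 0 by omega, show ((0:Int) % 10) = 0 by omega]
      rw [show nzdN 0 = 0 from by rw [nzdN]; simp]
      split_ifs <;> omega
  | succ n ihn =>
    intro k
    rw [stupid_succ, alt_succ, ihn]

-- ===== VERDICT (by name: the statement is the Claim_ definition above) =====
theorem stupid_spec : Claim_equal_stupid := by
  intro n k _
  unfold Spec_stupid
  rcases Int.lt_or_le n 0 with h | h
  · unfold stupid stupid_alt
    rw [PySem.List.pyRange_one_eq_nil (by omega)]
    simp [List.foldl_nil, h]
  · have := stupid_eq_alt_nat n.toNat k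
    rwa [Int.toNat_of_nonneg h] at this
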